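-- pv_equiv track=rewrite | github.com/Enio-Telles/rag_multiagent_system_v2 | src/api/review_api_secure.py | _calcular_checksum_codigo_barra
-- ===== SOURCE A (Python) =====
-- from typing import List, Optional, Dict, Any
--
-- def _calcular_checksum_codigo_barra(digitos: List[int]) -> int:
--     """
--     Calcula o dígito verificador para código de barras (EAN/UPC)
--     """
--     if not digitos:
--         raise ValueError("Lista de dígitos não pode estar vazia")
--
--     soma = 0
--     for i, digito in enumerate(reversed(digitos)):
--         peso = 3 if i % 2 == 0 else 1
--         soma += digito * peso
--
--     resto = soma % 10
--     return (10 - resto) % 10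
-- ===== SOURCE B (Python) =====
-- def _calcular_checksum_codigo_barra(digitos):
--     if not digitos:
--         raise ValueError("Lista de dígitos não pode estar vazia")
--     rev = digitos[::-1]
--     soma = 3 * sum(rev[0::2]) + sum(rev[1::2])
--     return (10 - soma % 10) % 10
-- ===== Notes on version B (the rewrite author's own statement) =====
-- stated objective: faster
-- what changed: Replaces the indexed per-element weight branch with one reversal and two strided slice sums (weight-3 on rev[0::2], weight-1 on rev[1::2]), moving the per-element work into C-level slicing and sum().
import Mathlib
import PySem

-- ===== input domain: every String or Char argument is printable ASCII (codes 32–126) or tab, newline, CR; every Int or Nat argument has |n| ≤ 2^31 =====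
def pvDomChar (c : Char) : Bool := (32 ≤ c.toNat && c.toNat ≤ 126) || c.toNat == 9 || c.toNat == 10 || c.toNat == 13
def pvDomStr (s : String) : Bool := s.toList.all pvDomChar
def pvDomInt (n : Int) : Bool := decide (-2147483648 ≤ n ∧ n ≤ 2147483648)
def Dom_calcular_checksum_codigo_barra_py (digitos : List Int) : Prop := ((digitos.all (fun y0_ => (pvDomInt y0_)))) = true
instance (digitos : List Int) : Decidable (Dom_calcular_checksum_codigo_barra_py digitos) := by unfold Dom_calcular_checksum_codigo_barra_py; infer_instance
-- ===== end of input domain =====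

-- B replaces A's per-index weight branch by one reversal and two strided slice sums (measurably faster in Python via C-level slicing/sum); the empty-list ValueError is excluded by Pre_.


-- ===== PORT A =====
-- the 'for i, digito in enumerate(reversed(digitos))' loop, carrying the index i and the accumulator soma
def pvLoopA : List Int → Nat → Int → Int
  | [], _, soma => soma
  | d :: rest, i, soma => pvLoopA rest (i + 1) (soma + d * (if i % 2 = 0 then 3 else 1))

def calcular_checksum_codigo_barra_py (digitos : List Int) : Int :=
  -- 'if not digitos: raise ValueError' — excluded by Pre_; value here irrelevant
  if digitos = [] then 0
  else
    let soma := pvLoopA digitos.reverse 0 0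
    let resto := PySem.Int.mod soma 10
    PySem.Int.mod (10 - resto) 10

-- ===== PORT B =====
-- rev[0::2]: every second element starting at index 0 (exact hand port of step-2 slicing on a list)
def pvEveryOther : List Int → List Int
  | [] => []
  | x :: rest => x :: pvEveryOther rest.tail
termination_by l => l.length
decreasing_by simp [List.length_tail]

def calcular_checksum_codigo_barra_py_alt (digitos : List Int) : Int :=
  if digitos = [] then 0
  else
    let rev := digitos.reverse
    let soma := 3 * (pvEveryOther rev).sum + (pvEveryOther rev.tail).sum
    PySem.Int.mod (10 - PySem.Int.mod soma 10) 10

-- ===== PRECONDITION & SPEC =====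
-- A raises ValueError on the empty list; Pre_ excludes exactly that input.
def Pre_calcular_checksum_codigo_barra_py (digitos : List Int) : Prop := digitos ≠ []
instance (digitos : List Int) : Decidable (Pre_calcular_checksum_codigo_barra_py digitos) := by unfold Pre_calcular_checksum_codigo_barra_py; infer_instance
def pvWitness_calcular_checksum_codigo_barra_py : List Int := [4, 0, 0, 6, 3, 8, 1, 3, 3, 3, 9, 3]

def Spec_calcular_checksum_codigo_barra_py (digitos : List Int) (out : Int) : Prop := out = calcular_checksum_codigo_barra_py_alt digitos
instance (digitos : List Int) (out : Int) : Decidable (Spec_calcular_checksum_codigo_barra_py digitos out) := by unfold Spec_calcular_checksum_codigo_barra_py; infer_instance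

-- ===== CLAIM (what is proved, stated in full; the proofs are below) =====
def Claim_equal_calcular_checksum_codigo_barra_py : Prop := ∀ (digitos : List Int), Dom_calcular_checksum_codigo_barra_py digitos → Pre_calcular_checksum_codigo_barra_py digitos → Spec_calcular_checksum_codigo_barra_py digitos (calcular_checksum_codigo_barra_py digitos)

-- ===== LEMMAS AND PROOFS =====
lemma pvEveryOther_nil : pvEveryOther [] = [] := by rw [pvEveryOther.eq_def]
lemma pvEveryOther_cons (x : Int) (rest : List Int) :
    pvEveryOther (x :: rest) = x :: pvEveryOther rest.tail := by rw [pvEveryOther.eq_def]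

-- A's weighted loop equals B's two strided sums, jointly for even and odd index.
lemma pvLoopA_eo (l : List Int) : ∀ (i : Nat) (s : Int),
    pvLoopA l (2 * i) s = s + 3 * (pvEveryOther l).sum + (pvEveryOther l.tail).sum ∧
    pvLoopA l (2 * i + 1) s = s + (pvEveryOther l).sum + 3 * (pvEveryOther l.tail).sum := by
  induction l with
  | nil => intro i s; simp [pvLoopA, pvEveryOther_nil]
  | cons d rest ih =>
    intro i s
    constructor
    · have h := (ih i (s + d * 3)).2
      simp only [pvLoopA, Nat.mul_mod_right, if_true]
      rw [h, pvEveryOther_cons]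
      simp only [List.sum_cons, List.tail_cons]
      ring
    · have h := (ih (i + 1) (s + d * 1)).1
      have hidx : 2 * i + 1 + 1 = 2 * (i + 1) := by ring
      simp only [pvLoopA]
      rw [if_neg (by omega), hidx, h, pvEveryOther_cons]
      simp only [List.sum_cons, List.tail_cons]
      ring

-- ===== VERDICT (by name: the statement is the Claim_ definition above) =====
theorem calcular_checksum_codigo_barra_py_spec : Claim_equal_calcular_checksum_codigo_barra_py := by
  intro digitos _ hpre
  unfold Spec_calcular_checksum_codigo_barra_py
  unfold calcular_checksum_codigo_barra_py calcular_checksum_codigo_barra_py_alt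
  rw [if_neg hpre, if_neg hpre]
  have h := (pvLoopA_eo digitos.reverse 0 0).1
  simp only [Nat.mul_zero, zero_add] at h
  rw [h]
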